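-- pv_equiv track=rewrite | github.com/berezhko/et2 | notebook/Шкафы.py | iterate_range
-- ===== SOURCE A (Python) =====
-- def iterate_range(row_devices, a, b):
--     result = []
--     stop_skiped = True
--     for device in row_devices:
--         if device == b:
--             break
--         if device == a:
--             stop_skiped = False
--         if stop_skiped is True:
--             continue
--         result.append(device)
--     return result
-- ===== SOURCE B (Python) =====
-- def iterate_range(row_devices, a, b):
--     devices = list(row_devices)
--     try:
--         jb = devices.index(b)
--     except ValueError:
--         jb = len(devices)
--     head = devices[:jb]
--     try:
--         ja = head.index(a)
--     except ValueError:
--         return []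
--     return head[ja:]
-- ===== Notes on version B (the rewrite author's own statement) =====
-- stated objective: simpler
-- what changed: Replaces the flag-driven single pass with index-finding and slicing: cut the list at the first b, then return the suffix of that prefix starting at the first a (or [] if a is absent).
import Mathlib
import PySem

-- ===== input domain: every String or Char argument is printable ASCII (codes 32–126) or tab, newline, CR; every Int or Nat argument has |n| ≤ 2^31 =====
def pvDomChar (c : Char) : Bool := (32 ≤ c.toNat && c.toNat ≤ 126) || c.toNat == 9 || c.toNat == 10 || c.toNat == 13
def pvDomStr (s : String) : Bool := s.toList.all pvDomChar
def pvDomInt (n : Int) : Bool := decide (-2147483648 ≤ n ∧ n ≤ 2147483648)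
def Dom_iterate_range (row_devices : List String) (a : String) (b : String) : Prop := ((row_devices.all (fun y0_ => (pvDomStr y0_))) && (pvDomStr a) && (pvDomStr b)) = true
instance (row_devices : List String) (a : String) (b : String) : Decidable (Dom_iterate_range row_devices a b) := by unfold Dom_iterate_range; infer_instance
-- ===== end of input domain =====

-- B replaces A's flag-driven single pass by index-finding and slicing (objective: simpler).

-- ===== PORT A =====
-- the for-loop with its (result, stop_skiped) state and the break on b
def iterLoopA : List String → String → String → List String → Bool → List String
  | [], _, _, result, _ => result
  | device :: rest, a, b, result, stop_skiped =>
    if device = b then result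
    else
      let stop_skiped := if device = a then false else stop_skiped
      if stop_skiped = true then iterLoopA rest a b result stop_skiped
      else iterLoopA rest a b (result ++ [device]) stop_skiped

def iterate_range (row_devices : List String) (a : String) (b : String) : List String :=
  iterLoopA row_devices a b [] true

-- ===== PORT B =====
def iterate_range_alt (row_devices : List String) (a : String) (b : String) : List String :=
  let devices := row_devices
  let jb : Nat := (PySem.List.index? devices b).getD devices.length
  let head := PySem.List.slice devices none (some (jb : Int))
  match PySem.List.index? head a with
  | none => []
  | some ja => PySem.List.slice head (some (ja : Int)) none

-- ===== PRECONDITION & SPEC =====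
def Spec_iterate_range (row_devices : List String) (a : String) (b : String) (out : List String) : Prop := out = iterate_range_alt row_devices a b
instance (row_devices : List String) (a : String) (b : String) (out : List String) : Decidable (Spec_iterate_range row_devices a b out) := by unfold Spec_iterate_range; infer_instance

-- ===== CLAIM (what is proved, stated in full; the proofs are below) =====
def Claim_equal_iterate_range : Prop := ∀ (row_devices : List String) (a : String) (b : String), Dom_iterate_range row_devices a b → Spec_iterate_range row_devices a b (iterate_range row_devices a b)

-- ===== LEMMAS AND PROOFS =====

-- take up to the first occurrence of b is takeWhile (≠ b)
theorem take_index_eq_takeWhile (xs : List String) (b : String) :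
    xs.take ((PySem.List.index? xs b).getD xs.length) = xs.takeWhile (· != b) := by
  induction xs with
  | nil => simp
  | cons x xs ih =>
    by_cases hx : x = b
    · subst hx
      rw [PySem.List.index?_cons_self]
      simp
    · rw [PySem.List.index?_cons_of_ne xs hx]
      cases h : PySem.List.index? xs b with
      | none =>
        rw [h] at ih
        simp only [Option.map_none, Option.getD_none, List.length_cons, List.take_succ_cons,
          List.takeWhile_cons, Option.getD_none] at *
        simp [hx, ih]
      | some k =>
        rw [h] at ih
        simp only [Option.map_some, Option.getD_some, List.take_succ_cons,
          List.takeWhile_cons] at *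
        simp [hx, ih]

-- drop to the first occurrence of a (or [] if absent) is dropWhile (≠ a)
theorem drop_index_eq_dropWhile (xs : List String) (a : String) :
    (match PySem.List.index? xs a with
      | none => ([] : List String)
      | some ja => xs.drop ja) = xs.dropWhile (· != a) := by
  induction xs with
  | nil => simp
  | cons x xs ih =>
    by_cases hx : x = a
    · subst hx
      rw [PySem.List.index?_cons_self]
      simp
    · rw [PySem.List.index?_cons_of_ne xs hx]
      cases h : PySem.List.index? xs a with
      | none =>
        rw [h] at ih
        simp only [Option.map_none, List.dropWhile_cons]
        simpa [hx] using ih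
      | some k =>
        rw [h] at ih
        simp only [Option.map_some, List.drop_succ_cons, List.dropWhile_cons]
        simpa [hx] using ih

-- B computes dropWhile(≠a) ∘ takeWhile(≠b)
theorem alt_eq (row_devices : List String) (a b : String) :
    iterate_range_alt row_devices a b
      = (row_devices.takeWhile (· != b)).dropWhile (· != a) := by
  simp only [iterate_range_alt]
  rw [PySem.List.slice_to_natCast, take_index_eq_takeWhile]
  cases h : PySem.List.index? (row_devices.takeWhile (· != b)) a with
  | none => rw [← drop_index_eq_dropWhile _ a, h]
  | some ja =>
    rw [← drop_index_eq_dropWhile _ a, h]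
    simp [PySem.List.slice_from_natCast]

-- A's loop once the flag is cleared: append everything up to the break
theorem loopA_false (rd : List String) (a b : String) (res : List String) :
    iterLoopA rd a b res false = res ++ rd.takeWhile (· != b) := by
  induction rd generalizing res with
  | nil => simp [iterLoopA]
  | cons d ds ih =>
    by_cases hd : d = b
    · subst hd; simp [iterLoopA]
    · simp only [iterLoopA, if_neg hd, List.takeWhile_cons]
      split_ifs <;> simp_all

-- A's loop with the flag still set
theorem loopA_true (rd : List String) (a b : String) (res : List String) :
    iterLoopA rd a b res true
      = res ++ (rd.takeWhile (· != b)).dropWhile (· != a) := by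
  induction rd generalizing res with
  | nil => simp [iterLoopA]
  | cons d ds ih =>
    by_cases hd : d = b
    · subst hd; simp [iterLoopA]
    · by_cases ha : d = a
      · subst ha
        simp only [iterLoopA, if_neg hd, if_true, Bool.false_eq_true, if_false]
        rw [loopA_false]
        simp [hd]
      · simp only [iterLoopA, if_neg hd, if_neg ha, if_true]
        rw [ih]
        simp [hd, ha]

-- ===== VERDICT (by name: the statement is the Claim_ definition above) =====
theorem iterate_range_spec : Claim_equal_iterate_range := by
  intro rd a b _
  unfold Spec_iterate_range iterate_range
  rw [alt_eq, loopA_true, List.nil_append]
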